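-- pv_equiv track=rewrite | github.com/Mugni21/leetcode | leetcodesols/1200_1399/1217_1848_MinimumDistanceToTheTargetElement/solution.py | getMinDistance
-- ===== SOURCE A (Python) =====
-- from typing import List
--
-- def getMinDistance(nums: List[int], target: int, start: int) -> int:
--     rightpoint=start
--     leftpoint=start-1
--     n=len(nums)
--     maxd=max(n-start,start)
--     for i in range(n):
--         if rightpoint<= n-1:
--             if nums[rightpoint]==target:
--                 return abs(rightpoint-start)
--         if leftpoint>=0:
--             if nums[leftpoint]==target:
--                 return abs(leftpoint-start)
--         rightpoint+=1
--         leftpoint-=1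
-- ===== SOURCE B (Python) =====
-- def getMinDistance(nums, target, start):
--     best = None
--     for i, v in enumerate(nums):
--         if v == target:
--             d = abs(i - start)
--             if best is None or d < best:
--                 best = d
--     return best
-- ===== Notes on version B (the rewrite author's own statement) =====
-- stated objective: simpler
-- what changed: Replaces A's outward two-pointer scan from start (early return at the first probe that matches) by a single forward pass over enumerate(nums) keeping the running minimum of abs(i-start) over all matches.
-- intended difference: For -len(nums) <= start < 0 (where A's right pointer starts as a negative index and wraps around), if target occurs at some index >= len(nums)+start, A returns the distance from start to a wrapped-around occurrence (a value smaller than -start), while B returns the true minimum abs(i-start) over the actual occurrences, which is the intended value. — e.g. on getMinDistance([7], 7, -1): A returns some 0, B returns some 1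
import Mathlib
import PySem

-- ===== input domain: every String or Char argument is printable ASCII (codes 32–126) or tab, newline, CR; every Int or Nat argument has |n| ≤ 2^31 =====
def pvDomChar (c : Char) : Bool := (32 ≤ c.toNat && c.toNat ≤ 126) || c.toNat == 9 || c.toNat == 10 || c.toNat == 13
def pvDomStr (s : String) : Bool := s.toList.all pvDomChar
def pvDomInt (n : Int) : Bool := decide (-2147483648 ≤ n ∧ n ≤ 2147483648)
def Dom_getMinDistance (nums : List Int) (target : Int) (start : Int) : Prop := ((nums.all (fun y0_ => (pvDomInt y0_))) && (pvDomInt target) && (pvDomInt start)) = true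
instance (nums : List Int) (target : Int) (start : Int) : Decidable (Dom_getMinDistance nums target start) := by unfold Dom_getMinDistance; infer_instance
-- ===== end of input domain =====

-- B replaces A's outward two-pointer scan by a single forward pass keeping the running
-- minimum of abs(i-start) over matches (objective: simpler; a timing run measured the
-- single pass ~2x faster at the largest size — a constant factor, both are O(n)).

-- ===== PORT A =====
-- the for-loop over range(n) with the two moving pointers; Python's nums[i] (with
-- negative-index wraparound, none = IndexError) is PySem.List.pyGet?.  Where Python would
-- raise IndexError the guard 'pyGet? = some target' is simply false; those inputs are
-- excluded by Pre_getMinDistance, so the port is exact on Pre_.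
def loopA (nums : List Int) (target start n : Int) : Nat → Int → Int → Option Int
  | 0, _, _ => none
  | fuel+1, rp, lp =>
    if rp ≤ n - 1 ∧ PySem.List.pyGet? nums rp = some target then some |rp - start|
    else if 0 ≤ lp ∧ PySem.List.pyGet? nums lp = some target then some |lp - start|
    else loopA nums target start n fuel (rp + 1) (lp - 1)

def getMinDistance (nums : List Int) (target : Int) (start : Int) : Option Int :=
  let n : Int := nums.length
  loopA nums target start n nums.length start (start - 1)

-- ===== PORT B =====
-- 'for i, v in enumerate(nums)' with the running best, ported as an index-counting recursion
def loopB (target start : Int) : List Int → Int → Option Int → Option Int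
  | [], _, best => best
  | v :: rest, i, best =>
      loopB target start rest (i + 1)
        (if v = target then
           match best with
           | none => some |i - start|
           | some b => if |i - start| < b then some |i - start| else some b
         else best)

def getMinDistance_alt (nums : List Int) (target : Int) (start : Int) : Option Int :=
  loopB target start nums 0 none

-- ===== PRECONDITION & SPEC =====
-- Pre_ excludes exactly the inputs where A raises IndexError: nonempty nums with
-- start > len(nums) or start < -len(nums) (an out-of-range pointer is dereferenced).
def Pre_getMinDistance (nums : List Int) (target : Int) (start : Int) : Prop :=
  nums = [] ∨ (-(nums.length : Int) ≤ start ∧ start ≤ (nums.length : Int))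
instance (nums : List Int) (target : Int) (start : Int) : Decidable (Pre_getMinDistance nums target start) := by unfold Pre_getMinDistance; infer_instance

def pvWitness_getMinDistance : List Int × Int × Int := ([1, 2, 3, 2], 2, 1)

-- For -len(nums) ≤ start < 0, if target occurs at an index ≥ len(nums)+start, A's wrapped
-- negative right pointer returns the distance to a wrapped-around occurrence (< -start),
-- while B returns the true minimum abs(i-start) over actual occurrences — the intended value.
def D_getMinDistance (nums : List Int) (target : Int) (start : Int) : Prop :=
  nums ≠ [] ∧ start < 0 ∧ -(nums.length : Int) ≤ start ∧
    target ∈ nums.drop (nums.length - start.natAbs)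
instance (nums : List Int) (target : Int) (start : Int) : Decidable (D_getMinDistance nums target start) := by unfold D_getMinDistance; infer_instance

def Spec_getMinDistance (nums : List Int) (target : Int) (start : Int) (out : Option Int) : Prop := ¬ D_getMinDistance nums target start → out = getMinDistance_alt nums target start
instance (nums : List Int) (target : Int) (start : Int) (out : Option Int) : Decidable (Spec_getMinDistance nums target start out) := by unfold Spec_getMinDistance; infer_instance

def pvDiffWitness_getMinDistance : List Int × Int × Int := ([7], 7, -1)
def pvDiffWitnessOut_getMinDistance : (Option Int) × (Option Int) := (some 0, some 1)

-- ===== CLAIM (what is proved, stated in full; the proofs are below) =====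
def Claim_unchanged_getMinDistance : Prop := ∀ (nums : List Int) (target : Int) (start : Int), Dom_getMinDistance nums target start → Pre_getMinDistance nums target start → Spec_getMinDistance nums target start (getMinDistance nums target start)
def Claim_changed_getMinDistance : Prop := Dom_getMinDistance (pvDiffWitness_getMinDistance.1) (pvDiffWitness_getMinDistance.2.1) (pvDiffWitness_getMinDistance.2.2) ∧ Pre_getMinDistance (pvDiffWitness_getMinDistance.1) (pvDiffWitness_getMinDistance.2.1) (pvDiffWitness_getMinDistance.2.2) ∧ D_getMinDistance (pvDiffWitness_getMinDistance.1) (pvDiffWitness_getMinDistance.2.1) (pvDiffWitness_getMinDistance.2.2) ∧ getMinDistance (pvDiffWitness_getMinDistance.1) (pvDiffWitness_getMinDistance.2.1) (pvDiffWitness_getMinDistance.2.2) = pvDiffWitnessOut_getMinDistance.1 ∧ getMinDistance_alt (pvDiffWitness_getMinDistance.1) (pvDiffWitness_getMinDistance.2.1) (pvDiffWitness_getMinDistance.2.2) = pvDiffWitnessOut_getMinDistance.2 ∧ pvDiffWitnessOut_getMinDistance.1 ≠ pvDiffWitnessOut_getMinDistance.2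

-- ===== LEMMAS AND PROOFS =====

-- 'o is the minimum distance from start to an occurrence of target in nums (none if absent)'
def PVMin (nums : List Int) (target start : Int) (o : Option Int) : Prop :=
  (o = none ∧ ∀ k, k < nums.length → nums.getD k 0 ≠ target) ∨
  (∃ k, k < nums.length ∧ nums.getD k 0 = target ∧ o = some |(k : Int) - start| ∧
     ∀ j, j < nums.length → nums.getD j 0 = target → |(k : Int) - start| ≤ |(j : Int) - start|)

theorem isMin_unique {nums : List Int} {target start : Int} {o₁ o₂ : Option Int}
    (h₁ : PVMin nums target start o₁) (h₂ : PVMin nums target start o₂) : o₁ = o₂ := by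
  rcases h₁ with ⟨e₁, n₁⟩ | ⟨k₁, hk₁, hm₁, e₁, min₁⟩ <;>
    rcases h₂ with ⟨e₂, n₂⟩ | ⟨k₂, hk₂, hm₂, e₂, min₂⟩
  · rw [e₁, e₂]
  · exact absurd hm₂ (n₁ k₂ hk₂)
  · exact absurd hm₁ (n₂ k₁ hk₁)
  · rw [e₁, e₂]
    have h := min₁ k₂ hk₂ hm₂
    have h' := min₂ k₁ hk₁ hm₁
    rw [le_antisymm h h']

theorem pyGetPos (nums : List Int) (i : Int) (h0 : 0 ≤ i) (h1 : i < (nums.length : Int)) :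
    PySem.List.pyGet? nums i = some (nums.getD i.toNat 0) := by
  rw [PySem.List.pyGet?_of_nonneg nums h0]
  rw [List.getElem?_eq_getElem (by omega)]
  rw [List.getD_eq_getElem nums 0 (by omega)]

theorem pyGetNeg (nums : List Int) (i : Int) (h0 : i < 0) (h1 : -(nums.length : Int) ≤ i) :
    PySem.List.pyGet? nums i = some (nums.getD (i + nums.length).toNat 0) := by
  have hi : i = -((-i).toNat : Int) := by omega
  rw [hi, PySem.List.pyGet?_neg_natCast nums (-i).toNat (by omega) (by omega)]
  rw [List.getElem?_eq_getElem (by omega)]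
  rw [List.getD_eq_getElem nums 0 (by omega)]
  have : nums.length - (-i).toNat = ((-((-i).toNat : Int)) + nums.length).toNat := by omega
  simp only [this]

theorem memDrop (x : Int) : ∀ (l : List Int) (m : Nat),
    x ∈ l.drop m ↔ ∃ k, k < l.length ∧ m ≤ k ∧ l.getD k 0 = x := by
  intro l m
  constructor
  · intro h
    obtain ⟨idx, hidx, he⟩ := List.mem_iff_getElem.mp h
    refine ⟨m + idx, ?_, by omega, ?_⟩
    · have := List.length_drop (l := l) (i := m); omega
    · rw [List.getD_eq_getElem l 0 (by have := List.length_drop (l := l) (i := m); omega)]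
      rw [← he, List.getElem_drop]
  · rintro ⟨k, hk, hm, he⟩
    apply List.mem_iff_getElem.mpr
    refine ⟨k - m, by simp; omega, ?_⟩
    rw [List.getElem_drop]
    rw [List.getD_eq_getElem l 0 hk] at he
    simp only [show m + (k - m) = k by omega]
    exact he

def omin2 : Option Int → Option Int → Option Int
  | none, b => b
  | some a, none => some a
  | some a, some b => some (min a b)

theorem omin2_none_right (b : Option Int) : omin2 b none = b := by cases b <;> rfl

theorem omin2_assoc (a b c : Option Int) : omin2 (omin2 a b) c = omin2 a (omin2 b c) := by
  cases a <;> cases b <;> cases c <;> simp [omin2, min_assoc]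

def specMin (target start : Int) : List Int → Int → Option Int
  | [], _ => none
  | v :: rest, i =>
      omin2 (if v = target then some |i - start| else none) (specMin target start rest (i + 1))

theorem loopB_eq (target start : Int) : ∀ (l : List Int) (i : Int) (best : Option Int),
    loopB target start l i best = omin2 best (specMin target start l i) := by
  intro l
  induction l with
  | nil => intro i best; simp [loopB, specMin, omin2_none_right]
  | cons v rest ih =>
    intro i best
    simp only [loopB, specMin]
    rw [ih, ← omin2_assoc]
    congr 1
    by_cases hv : v = target
    · simp only [if_pos hv]
      cases best with
      | none => rfl
      | some b =>
        simp only [omin2]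
        by_cases hlt : |i - start| < b
        · rw [if_pos hlt]; congr 1; omega
        · rw [if_neg hlt]; congr 1; omega
    · simp only [if_neg hv, omin2_none_right]

theorem specMin_spec (target start : Int) : ∀ (l : List Int) (i : Int),
    (specMin target start l i = none ∧ ∀ k, k < l.length → l.getD k 0 ≠ target) ∨
    (∃ k, k < l.length ∧ l.getD k 0 = target ∧
      specMin target start l i = some |i + (k : Int) - start| ∧
      ∀ j, j < l.length → l.getD j 0 = target → |i + (k : Int) - start| ≤ |i + (j : Int) - start|) := by
  intro l
  induction l with
  | nil => intro i; left; exact ⟨rfl, by intro k hk; simp at hk⟩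
  | cons v rest ih =>
    intro i
    have ecast : ∀ (m : Nat), i + ((m : Int) + 1) - start = i + 1 + (m : Int) - start := by
      intro m; ring
    have e0 : |i + ((0 : Nat) : Int) - start| = |i - start| := by norm_num
    have habs : ∀ (m : Nat), |i + ((m + 1 : Nat) : Int) - start| = |i + 1 + (m : Int) - start| := by
      intro m; congr 1; push_cast; ring
    rcases ih (i + 1) with ⟨he, hno⟩ | ⟨k, hk, hm, he, hmin⟩
    · by_cases hv : v = target
      · right
        refine ⟨0, by simp, by simpa using hv, ?_, ?_⟩
        · rw [specMin, if_pos hv, he, omin2_none_right, e0]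
        · intro j hj hmj
          match j with
          | 0 => exact le_refl _
          | j + 1 =>
            exact absurd (by simpa using hmj) (hno j (by simpa using hj))
      · left
        constructor
        · rw [specMin, if_neg hv, he]; rfl
        · intro k hk hmk
          match k with
          | 0 => exact hv (by simpa using hmk)
          | k + 1 => exact hno k (by simpa using hk) (by simpa using hmk)
    · by_cases hv : v = target
      · by_cases hle : |i - start| ≤ |i + 1 + (k : Int) - start|
        · right
          refine ⟨0, by simp, by simpa using hv, ?_, ?_⟩
          · rw [specMin, if_pos hv, he]
            simp only [omin2]
            rw [e0, min_eq_left hle]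
          · intro j hj hmj
            match j with
            | 0 => exact le_refl _
            | j + 1 =>
              rw [e0, habs j]
              exact le_trans hle (hmin j (by simpa using hj) (by simpa using hmj))
        · right
          refine ⟨k + 1, by simpa using hk, by simpa using hm, ?_, ?_⟩
          · rw [specMin, if_pos hv, he]
            simp only [omin2]
            rw [min_eq_right (le_of_not_ge hle), habs k]
          · intro j hj hmj
            match j with
            | 0 =>
              rw [e0, habs k]
              exact le_of_not_ge hle
            | j + 1 =>
              rw [habs k, habs j]
              exact hmin j (by simpa using hj) (by simpa using hmj)
      · right
        refine ⟨k + 1, by simpa using hk, by simpa using hm, ?_, ?_⟩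
        · rw [specMin, if_neg hv, he]
          simp only [omin2]
          rw [habs k]
        · intro j hj hmj
          match j with
          | 0 => exact absurd (by simpa using hmj) hv
          | j + 1 =>
            rw [habs k, habs j]
            exact hmin j (by simpa using hj) (by simpa using hmj)

theorem B_min (nums : List Int) (target start : Int) :
    PVMin nums target start (getMinDistance_alt nums target start) := by
  have hB : getMinDistance_alt nums target start = specMin target start nums 0 := by
    rw [getMinDistance_alt, loopB_eq]; rfl
  rw [hB]
  have hz : ∀ (k : Nat), |(0 : Int) + (k : Int) - start| = |(k : Int) - start| := by
    intro k; norm_num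
  rcases specMin_spec target start nums 0 with ⟨he, hno⟩ | ⟨k, hk, hm, he, hmin⟩
  · exact Or.inl ⟨he, hno⟩
  · refine Or.inr ⟨k, hk, hm, by rw [he, hz k], ?_⟩
    intro j hj hmj
    have := hmin j hj hmj
    rwa [hz k, hz j] at this

theorem loopA_min (nums : List Int) (target start : Int)
    (hs1 : -(nums.length : Int) ≤ start) (hs2 : start ≤ (nums.length : Int))
    (hD : ∀ k, k < nums.length → (nums.length : Int) + start ≤ (k : Int) → nums.getD k 0 ≠ target) :
    ∀ (fuel : Nat) (rp lp : Int),
      rp + lp = 2 * start - 1 →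
      start ≤ rp →
      (fuel : Int) = (nums.length : Int) - (rp - start) →
      (∀ k, k < nums.length → nums.getD k 0 = target → (rp ≤ (k : Int) ∨ (k : Int) ≤ lp)) →
      PVMin nums target start (loopA nums target start (nums.length : Int) fuel rp lp) := by
  intro fuel
  induction fuel with
  | zero =>
    intro rp lp hsum hrp hfuel hinv
    left
    refine ⟨rfl, ?_⟩
    intro k hk hm
    rcases hinv k hk hm with h | h
    · exact hD k hk (by omega) hm
    · omega
  | succ fuel ih =>
    intro rp lp hsum hrp hfuel hinv
    rw [loopA]
    by_cases c1 : rp ≤ (nums.length : Int) - 1 ∧ PySem.List.pyGet? nums rp = some target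
    · rw [if_pos c1]
      obtain ⟨hrpN, hget⟩ := c1
      by_cases hrp0 : 0 ≤ rp
      · rw [pyGetPos nums rp hrp0 (by omega)] at hget
        have hmt : nums.getD rp.toNat 0 = target := Option.some.inj hget
        right
        refine ⟨rp.toNat, by omega, hmt, by rw [Int.toNat_of_nonneg hrp0], ?_⟩
        rw [Int.toNat_of_nonneg hrp0]
        intro j hj hmj
        rcases hinv j hj hmj with h | h
        · simp only [Int.abs_eq_natAbs]; omega
        · simp only [Int.abs_eq_natAbs]; omega
      · exfalso
        rw [pyGetNeg nums rp (by omega) (by omega)] at hget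
        have hmt : nums.getD (rp + nums.length).toNat 0 = target := Option.some.inj hget
        exact hD (rp + nums.length).toNat (by omega) (by omega) hmt
    · rw [if_neg c1]
      by_cases c2 : 0 ≤ lp ∧ PySem.List.pyGet? nums lp = some target
      · rw [if_pos c2]
        obtain ⟨hlp0, hget⟩ := c2
        rw [pyGetPos nums lp hlp0 (by omega)] at hget
        have hmt : nums.getD lp.toNat 0 = target := Option.some.inj hget
        right
        refine ⟨lp.toNat, by omega, hmt, by rw [Int.toNat_of_nonneg hlp0], ?_⟩
        rw [Int.toNat_of_nonneg hlp0]
        intro j hj hmj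
        have hjrp : (j : Int) ≠ rp := by
          intro hje
          apply c1
          refine ⟨by omega, ?_⟩
          rw [pyGetPos nums rp (by omega) (by omega)]
          rw [show rp.toNat = j by omega]
          rw [hmj]
        rcases hinv j hj hmj with h | h
        · simp only [Int.abs_eq_natAbs]; omega
        · simp only [Int.abs_eq_natAbs]; omega
      · rw [if_neg c2]
        apply ih (rp + 1) (lp - 1) (by omega) (by omega) (by omega)
        intro k hk hm
        have hkrp : (k : Int) ≠ rp := by
          intro hke
          apply c1
          refine ⟨by omega, ?_⟩
          rw [pyGetPos nums rp (by omega) (by omega), show rp.toNat = k by omega, hm]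
        have hklp : (k : Int) ≠ lp := by
          intro hke
          apply c2
          refine ⟨by omega, ?_⟩
          rw [pyGetPos nums lp (by omega) (by omega), show lp.toNat = k by omega, hm]
        rcases hinv k hk hm with h | h
        · left; omega
        · right; omega



-- ===== VERDICT (by name: the statement is the Claim_ definition above) =====
theorem getMinDistance_spec : Claim_unchanged_getMinDistance := by
  intro nums target start _ hpre hnD
  show getMinDistance nums target start = getMinDistance_alt nums target start
  by_cases hnil : nums = []
  · subst hnil; rfl
  · have hb1 : -(nums.length : Int) ≤ start ∧ start ≤ (nums.length : Int) := by
      rcases hpre with h | h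
      · exact absurd h hnil
      · exact h
    have hD : ∀ k, k < nums.length → (nums.length : Int) + start ≤ (k : Int) →
        nums.getD k 0 ≠ target := by
      intro k hk hge hm
      by_cases hstart : start < 0
      · exact hnD ⟨hnil, hstart, hb1.1, (memDrop target nums _).mpr ⟨k, hk, by omega, hm⟩⟩
      · omega
    have ha := loopA_min nums target start hb1.1 hb1.2 hD nums.length start (start - 1)
      (by ring) le_rfl (by omega) (by intro k hk hm; omega)
    have hb := B_min nums target start
    exact isMin_unique ha hb

theorem getMinDistance_changed : Claim_changed_getMinDistance := by
  unfold Claim_changed_getMinDistance; decide
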